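-- pv_equiv track=rewrite | github.com/pmbechard/CodingChallenges | CodeWars/6kyu/sort_the_number_sequence.py | sort_sequence
-- ===== SOURCE A (Python) =====
-- def sort_sequence(sequence):
--     mut_copy = sequence[:]
--     sub_lists = []
--     results = []
--     zeroes = mut_copy.count(0)
--     for i in range(zeroes):
--         sub_lists += [mut_copy[:mut_copy.index(0)+1]]
--         mut_copy = mut_copy[mut_copy.index(0)+1:]
--     for list in sub_lists:
--         list.remove(list[-1])
--         list = sorted(list)
--         list.append(0)
--         results += [list]
--     results = sum(sorted(results, key=lambda result: sum(result)), [])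
--     return results
-- ===== SOURCE B (Python) =====
-- def sort_sequence(sequence):
--     # One linear pass splits on zeros (elements after the last zero are dropped,
--     # as in the original); each segment is sorted with its terminating zero kept
--     # last, segments are stably ordered by sum and concatenated.
--     segments = []
--     cur = []
--     for x in sequence:
--         if x == 0:
--             segments.append(sorted(cur) + [0])
--             cur = []
--         else:
--             cur.append(x)
--     segments.sort(key=sum)
--     return [v for seg in segments for v in seg]
-- ===== Notes on version B (the rewrite author's own statement) =====
-- stated objective: alternative
-- what changed: Replaces the repeated count/index/slice passes (one index plus two slices of the remaining list per zero) by a single linear pass that splits on zeros and sorts each segment as it closes, then stably orders segments by sum.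
import Mathlib
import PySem

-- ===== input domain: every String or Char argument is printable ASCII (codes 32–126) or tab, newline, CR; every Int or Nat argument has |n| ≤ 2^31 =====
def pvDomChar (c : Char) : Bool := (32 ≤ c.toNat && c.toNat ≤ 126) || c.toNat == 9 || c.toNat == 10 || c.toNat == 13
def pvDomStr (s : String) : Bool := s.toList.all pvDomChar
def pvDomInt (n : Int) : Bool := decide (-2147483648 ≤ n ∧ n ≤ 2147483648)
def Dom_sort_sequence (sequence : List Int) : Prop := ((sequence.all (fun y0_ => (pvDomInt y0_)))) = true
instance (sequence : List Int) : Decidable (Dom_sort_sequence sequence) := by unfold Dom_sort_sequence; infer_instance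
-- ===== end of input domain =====

-- B replaces A's per-zero count/index/slice passes by one linear splitting pass (alternative algorithm).


-- ===== PORT A =====
-- one iteration of A's first loop: sub_lists += [mut_copy[:idx+1]]; mut_copy = mut_copy[idx+1:]
-- (inside the loop mut_copy always contains a 0, so the .getD 0 fallback of index? is never taken)
def pvStepA (s : List Int × List (List Int)) : List Int × List (List Int) :=
  let idx : Nat := (PySem.List.index? s.1 0).getD 0
  (PySem.List.slice s.1 (some ((idx : Int) + 1)) none,
   s.2 ++ [PySem.List.slice s.1 none (some ((idx : Int) + 1))])

-- body of A's second loop: list.remove(list[-1]); list = sorted(list); list.append(0)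
-- (sublists are nonempty, so the .getD fallbacks are never taken)
def pvTransA (lst : List Int) : List Int :=
  let last : Int := (PySem.List.pyGet? lst (-1)).getD 0
  let lst' : List Int := (PySem.List.remove? lst last).getD lst
  PySem.List.sorted lst' (fun v => v) false ++ [0]

def sort_sequence (sequence : List Int) : List Int :=
  let mut_copy := sequence
  let zeroes := PySem.List.count mut_copy 0
  let p := (PySem.List.pyRange 0 (zeroes : Int) 1).foldl (fun s _ => pvStepA s) (mut_copy, [])
  let results := p.2.foldl (fun acc lst => acc ++ [pvTransA lst]) []
  (PySem.List.sorted results (fun r => r.sum) false).foldl (· ++ ·) []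

-- ===== PORT B =====
-- single pass: close a segment (sorted, zero re-appended) at each 0; leftover after the last 0 is dropped
def pvSegsB : List Int → List Int → List (List Int)
  | [], _ => []
  | x :: rest, cur =>
      if x = 0 then (PySem.List.sorted cur (fun v => v) false ++ [0]) :: pvSegsB rest []
      else pvSegsB rest (cur ++ [x])

def sort_sequence_alt (sequence : List Int) : List Int :=
  (PySem.List.sorted (pvSegsB sequence []) (fun seg => seg.sum) false).flatten

-- ===== PRECONDITION & SPEC =====
def Spec_sort_sequence (sequence : List Int) (out : List Int) : Prop := out = sort_sequence_alt sequence
instance (sequence : List Int) (out : List Int) : Decidable (Spec_sort_sequence sequence out) := by unfold Spec_sort_sequence; infer_instance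

-- ===== CLAIM (what is proved, stated in full; the proofs are below) =====
def Claim_equal_sort_sequence : Prop := ∀ (sequence : List Int), Dom_sort_sequence sequence → Spec_sort_sequence sequence (sort_sequence sequence)

-- ===== LEMMAS AND PROOFS =====

theorem pvFoldlAppendFlatten (l : List (List Int)) (acc : List Int) :
    l.foldl (· ++ ·) acc = acc ++ l.flatten := by
  induction l generalizing acc with
  | nil => simp
  | cons x xs ih => simp [ih]

-- the sublists A's first loop produces after n iterations, as a recursion on n
def pvSegsN : Nat → List Int → List (List Int)
  | 0, _ => []
  | n + 1, l =>
      let idx : Nat := (PySem.List.index? l 0).getD 0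
      PySem.List.slice l none (some ((idx : Int) + 1)) ::
        pvSegsN n (PySem.List.slice l (some ((idx : Int) + 1)) none)

theorem pvFoldA_eq_segsN (r : List Int) (l : List Int) (acc : List (List Int)) :
    (r.foldl (fun s _ => pvStepA s) (l, acc)).2 = acc ++ pvSegsN r.length l := by
  induction r generalizing l acc with
  | nil => simp [pvSegsN]
  | cons x r ih =>
      simp only [List.foldl_cons, List.length_cons]
      rw [show pvStepA (l, acc) =
        (PySem.List.slice l (some ((((PySem.List.index? l 0).getD 0 : Nat) : Int) + 1)) none,
         acc ++ [PySem.List.slice l none (some ((((PySem.List.index? l 0).getD 0 : Nat) : Int) + 1))]) from rfl]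
      rw [ih]
      simp [pvSegsN]

theorem pvSegsB_eq_map (l : List Int) (cur : List Int) (hcur : (0 : Int) ∉ cur) :
    pvSegsB l cur = (pvSegsN (PySem.List.count (cur ++ l) 0) (cur ++ l)).map pvTransA := by
  induction l generalizing cur with
  | nil =>
      have hc : PySem.List.count (cur ++ []) 0 = 0 := by
        simp [PySem.List.count, List.count_eq_zero, hcur]
      rw [hc]; simp [pvSegsB, pvSegsN]
  | cons x rest ih =>
      by_cases hx : x = 0
      · subst hx
        have hcnt : PySem.List.count (cur ++ 0 :: rest) 0
            = PySem.List.count rest 0 + 1 := by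
          simp [PySem.List.count, List.count_append, List.count_eq_zero.mpr hcur]
        rw [hcnt]
        have hidx : PySem.List.index? (cur ++ 0 :: rest) 0 = some cur.length := by
          have : cur ++ 0 :: rest = (cur ++ [0]) ++ rest := by simp
          rw [this, PySem.List.index?_append_of_mem _ (by simp),
            PySem.List.index?_append_singleton_self cur 0 hcur]
        have hcast : ((cur.length : Int) + 1) = ((cur.length + 1 : Nat) : Int) := by push_cast; ring
        have htake : PySem.List.slice (cur ++ 0 :: rest) none (some ((cur.length : Int) + 1))
            = cur ++ [0] := by
          rw [hcast, PySem.List.slice_to_natCast]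
          rw [show cur.length + 1 = cur.length + 1 from rfl, List.take_append]
          simp
        have hdrop : PySem.List.slice (cur ++ 0 :: rest) (some ((cur.length : Int) + 1)) none
            = rest := by
          rw [hcast, PySem.List.slice_from_natCast, List.drop_append]
          simp
        have htrans : pvTransA (cur ++ [0]) = PySem.List.sorted cur (fun v => v) false ++ [0] := by
          unfold pvTransA
          rw [PySem.List.pyGet?_neg_one_append_singleton]
          have hrm : PySem.List.remove? (cur ++ [0]) 0 = some cur := by
            rw [PySem.List.remove?_eq_some_erase (cur ++ [0]) 0 (by simp), List.erase_append_right _ hcur]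
            simp
          simp [hrm]
        show (PySem.List.sorted cur (fun v => v) false ++ [0]) :: pvSegsB rest [] = _
        rw [pvSegsN]
        simp only [hidx, Option.getD_some, htake, hdrop, List.map_cons, htrans]
        have := ih [] (by simp)
        simpa using this
      · have hstep : pvSegsB (x :: rest) cur = pvSegsB rest (cur ++ [x]) := by
          simp [pvSegsB, hx]
        rw [hstep, ih (cur ++ [x]) (by simp [hcur, Ne.symm hx])]
        have : cur ++ [x] ++ rest = cur ++ x :: rest := by simp
        rw [this]

-- ===== VERDICT (by name: the statement is the Claim_ definition above) =====
theorem sort_sequence_spec : Claim_equal_sort_sequence := by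
  intro sequence _
  show sort_sequence sequence = sort_sequence_alt sequence
  simp only [sort_sequence, sort_sequence_alt]
  rw [pvFoldA_eq_segsN, PySem.List.length_pyRange_one]
  have hz : ((PySem.List.count sequence 0 : Int) - 0).toNat = PySem.List.count sequence 0 := by
    simp
  rw [hz]
  rw [PySem.List.foldl_append_singleton_eq_map]
  have hB : pvSegsB sequence [] = (pvSegsN (PySem.List.count sequence 0) sequence).map pvTransA := by
    simpa using pvSegsB_eq_map sequence [] (by simp)
  rw [hB, pvFoldlAppendFlatten]
  simp
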